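-- pv_equiv track=rewrite | github.com/anasvc/Py310-VMoveCAE | ScriptsandDlls/src/VMoveCAEBatch.py | compute_last_step_frames
-- ===== SOURCE A (Python) =====
-- def compute_last_step_frames(res_list):
--     last_step = None
--     last_frames = None
--     last_step_int = None
--     last_frames_int = None
--     for res_prop in res_list:
--         res_name = res_prop[1]
--         elem = res_name.split(':')
--         if len(elem) <= 1:
--             continue
--
--         sstep = None
--         sframe = None
--
--         if len(elem) > 1:
--             try:
--                 iv = int(elem[1])
--                 sstep = elem[1]
--             except ValueError:
--                 pass
--
--         if len(elem) > 2:
--             try: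
--                 iv = int(elem[2])
--                 if sstep is None:
--                     sstep = elem[2]
--                 else:
--                     sframe = elem[2]
--             except ValueError:
--                 sstep = None
--
--         if sstep is not None:
--             istep = int(sstep)
--             if last_step_int is None:
--                 last_step = sstep
--                 last_step_int = istep
--             elif istep > last_step_int:
--                 last_step = sstep
--                 last_step_int = istep
--         if sframe is not None:
--             iframe = int(sframe)
--             if last_frames is None:
--                 last_frames = {sstep: sframe}
--                 last_frames_int = {istep: iframe}
--             elif istep not in last_frames_int:
--                 last_frames[sstep] = sframe
--                 last_frames_int[istep] = iframe
--             elif iframe > last_frames_int[istep]: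
--                 last_frames[sstep] = sframe
--                 last_frames_int[istep] = iframe
--
--     return last_step, last_frames
-- ===== SOURCE B (Python) =====
-- def _parse(name):
--     # classify one result name into a record (sstep, sframe) or None (skipped)
--     parts = name.split(':')
--     if len(parts) < 2:
--         return None
--     if len(parts) == 2:
--         return (parts[1], None) if _as_int(parts[1]) is not None else None
--     if _as_int(parts[2]) is None:
--         return None
--     if _as_int(parts[1]) is not None:
--         return (parts[1], parts[2])
--     return (parts[2], None)
--
--
-- def _as_int(s):
--     try:
--         return int(s)
--     except ValueError:
--         return None
--
--
-- def compute_last_step_frames(res_list):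
--     records = []
--     for res_prop in res_list:
--         rec = _parse(res_prop[1])
--         if rec is not None:
--             records.append(rec)
--     if not records:
--         return None, None
--     last_step = max(records, key=lambda r: int(r[0]))[0]
--     frames = {}
--     frames_int = {}
--     for sstep, sframe in records:
--         if sframe is None:
--             continue
--         istep, iframe = int(sstep), int(sframe)
--         if istep not in frames_int or iframe > frames_int[istep]:
--             frames[sstep] = sframe
--             frames_int[istep] = iframe
--     return last_step, (frames or None)
-- ===== Notes on version B (the rewrite author's own statement) =====
-- stated objective: alternative
-- what changed: A's single loop interleaving four accumulators is split into a parsing pass producing (sstep, sframe) records with a restructured classifier, then max(records, key=int-of-step) for the last step and a separate grouping pass for the per-step max frames (empty dict returned as None).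
import Mathlib
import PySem

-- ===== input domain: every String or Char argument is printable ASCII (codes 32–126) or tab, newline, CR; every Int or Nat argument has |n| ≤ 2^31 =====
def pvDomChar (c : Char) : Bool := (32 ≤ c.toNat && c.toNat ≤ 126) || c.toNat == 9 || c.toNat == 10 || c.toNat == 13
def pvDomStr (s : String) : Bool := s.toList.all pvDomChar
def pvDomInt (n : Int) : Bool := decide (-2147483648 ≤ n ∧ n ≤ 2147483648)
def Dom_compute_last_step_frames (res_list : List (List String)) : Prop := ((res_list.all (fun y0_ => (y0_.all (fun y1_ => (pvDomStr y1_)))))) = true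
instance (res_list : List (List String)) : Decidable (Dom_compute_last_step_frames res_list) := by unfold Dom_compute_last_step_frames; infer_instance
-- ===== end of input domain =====

-- B replaces A's single loop with four interleaved accumulators by a parse pass producing records
-- plus separate max / grouping aggregation passes (objective: a clearer decomposition, same values).

-- ===== PORT A =====
-- state: (last_step, last_frames, last_step_int, last_frames_int)
abbrev PvStA := Option String × Option (PySem.Dict String String) × Option Int × Option (PySem.Dict Int Int)

-- the body of A's 'for res_prop in res_list' loop; in the frame branch 'istep' is recomputed
-- from sf.1 — it equals Python's variable istep there, since sframe ≠ None forces sstep ≠ None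
def pvStepA (st : PvStA) (res_prop : List String) : PvStA :=
  let res_name := (PySem.List.pyGet? res_prop 1).getD ""   -- Pre_ guarantees the index is valid
  let elem := (PySem.Str.split? res_name ":").getD []      -- sep ":" ≠ "": split? is always some
  if elem.length ≤ 1 then st
  else
    let sstep1 : Option String :=
      match PySem.Int.ofStr? (elem.getD 1 "") with
      | some _ => some (elem.getD 1 "")
      | none => none
    let sf : Option String × Option String :=
      if elem.length > 2 then
        match PySem.Int.ofStr? (elem.getD 2 "") with
        | some _ =>
          match sstep1 with
          | none => (some (elem.getD 2 ""), none)
          | some s => (some s, some (elem.getD 2 ""))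
        | none => (none, none)
      else (sstep1, none)
    let stStep : Option String × Option Int :=
      match sf.1 with
      | none => (st.1, st.2.2.1)
      | some s =>
        let istep := (PySem.Int.ofStr? s).getD 0
        match st.2.2.1 with
        | none => (some s, some istep)
        | some li => if istep > li then (some s, some istep) else (st.1, some li)
    let stFrm : Option (PySem.Dict String String) × Option (PySem.Dict Int Int) :=
      match sf.2 with
      | none => (st.2.1, st.2.2.2)
      | some f =>
        let s := (sf.1).getD ""
        let istep := (PySem.Int.ofStr? s).getD 0
        let iframe := (PySem.Int.ofStr? f).getD 0
        match st.2.1, st.2.2.2 with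
        | none, _ => (some (PySem.Dict.insert PySem.Dict.empty s f),
                      some (PySem.Dict.insert PySem.Dict.empty istep iframe))
        | some lf, none => (some lf, none)   -- unreachable: the two dicts are created together
        | some lf, some lfi =>
          if !(lfi.contains istep) then (some (lf.insert s f), some (lfi.insert istep iframe))
          else if iframe > lfi.getD istep 0 then (some (lf.insert s f), some (lfi.insert istep iframe))
          else (some lf, some lfi)
    (stStep.1, stFrm.1, stStep.2, stFrm.2)

def compute_last_step_frames (res_list : List (List String)) : Option String × (Option (List (String × String))) :=
  let fin := res_list.foldl pvStepA (none, none, none, none)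
  (fin.1, fin.2.1.map PySem.Dict.items)

-- ===== PORT B =====
def pvAsInt? (s : String) : Option Int := PySem.Int.ofStr? s

def pvParse (name : String) : Option (String × Option String) :=
  let parts := (PySem.Str.split? name ":").getD []         -- sep ":" ≠ "": split? is always some
  if parts.length < 2 then none
  else if parts.length == 2 then
    if (pvAsInt? (parts.getD 1 "")).isSome then some (parts.getD 1 "", none) else none
  else if (pvAsInt? (parts.getD 2 "")).isNone then none
  else if (pvAsInt? (parts.getD 1 "")).isSome then some (parts.getD 1 "", some (parts.getD 2 ""))
  else some (parts.getD 2 "", none)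

def pvFrameStep (st : PySem.Dict String String × PySem.Dict Int Int) (r : String × Option String) :
    PySem.Dict String String × PySem.Dict Int Int :=
  match r.2 with
  | none => st
  | some sframe =>
    let istep := (pvAsInt? r.1).getD 0
    let iframe := (pvAsInt? sframe).getD 0
    if !(st.2.contains istep) || iframe > st.2.getD istep 0 then
      (st.1.insert r.1 sframe, st.2.insert istep iframe)
    else st

def compute_last_step_frames_alt (res_list : List (List String)) : Option String × (Option (List (String × String))) :=
  let records := res_list.filterMap (fun rp => pvParse ((PySem.List.pyGet? rp 1).getD ""))
  match PySem.List.max? records (fun r => (pvAsInt? r.1).getD 0) with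
  | none => (none, none)
  | some m =>
    let frames := (records.foldl pvFrameStep (PySem.Dict.empty, PySem.Dict.empty)).1
    (some m.1, if frames.items.isEmpty then none else some frames.items)

-- ===== PRECONDITION & SPEC =====
-- Pre_ excludes exactly the inputs where A raises IndexError (res_prop[1] on an inner list shorter than 2)
def Pre_compute_last_step_frames (res_list : List (List String)) : Prop :=
  ∀ rp ∈ res_list, 2 ≤ rp.length
instance (res_list : List (List String)) : Decidable (Pre_compute_last_step_frames res_list) := by unfold Pre_compute_last_step_frames; infer_instance
def pvWitness_compute_last_step_frames : List (List String) := [["a", "r:1:2"], ["b", "r:3"]]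

def Spec_compute_last_step_frames (res_list : List (List String)) (out : Option String × (Option (List (String × String)))) : Prop := out = compute_last_step_frames_alt res_list
instance (res_list : List (List String)) (out : Option String × (Option (List (String × String)))) : Decidable (Spec_compute_last_step_frames res_list out) := by unfold Spec_compute_last_step_frames; infer_instance

-- ===== CLAIM (what is proved, stated in full; the proofs are below) =====
def Claim_equal_compute_last_step_frames : Prop := ∀ (res_list : List (List String)), Dom_compute_last_step_frames res_list → Pre_compute_last_step_frames res_list → Spec_compute_last_step_frames res_list (compute_last_step_frames res_list)

-- ===== LEMMAS AND PROOFS =====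

-- B-style aggregation step on A's (last_step, last_step_int) pair
def pvStepU (st : Option String × Option Int) (r : String × Option String) : Option String × Option Int :=
  let istep := (pvAsInt? r.1).getD 0
  match st.2 with
  | none => (some r.1, some istep)
  | some li => if istep > li then (some r.1, some istep) else (st.1, some li)

-- A-style frame step on A's (last_frames, last_frames_int) pair
def pvFrmA (st : Option (PySem.Dict String String) × Option (PySem.Dict Int Int))
    (r : String × Option String) :
    Option (PySem.Dict String String) × Option (PySem.Dict Int Int) :=
  match r.2 with
  | none => st
  | some f =>
    let istep := (pvAsInt? r.1).getD 0
    let iframe := (pvAsInt? f).getD 0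
    match st.1, st.2 with
    | none, _ => (some (PySem.Dict.insert PySem.Dict.empty r.1 f),
                  some (PySem.Dict.insert PySem.Dict.empty istep iframe))
    | some lf, none => (some lf, none)
    | some lf, some lfi =>
      if !(lfi.contains istep) then (some (lf.insert r.1 f), some (lfi.insert istep iframe))
      else if iframe > lfi.getD istep 0 then (some (lf.insert r.1 f), some (lfi.insert istep iframe))
      else (some lf, some lfi)

def pvAgg (st : PvStA) (r : String × Option String) : PvStA :=
  ((pvStepU (st.1, st.2.2.1) r).1, (pvFrmA (st.2.1, st.2.2.2) r).1,
   (pvStepU (st.1, st.2.2.1) r).2, (pvFrmA (st.2.1, st.2.2.2) r).2)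

-- A's loop body, written with an arbitrary split result ps, factors through B's parser
theorem factor_core (st : PvStA) (ps : List String) :
    (if ps.length ≤ 1 then st
     else
       let sstep1 : Option String :=
         match PySem.Int.ofStr? (ps.getD 1 "") with
         | some _ => some (ps.getD 1 "")
         | none => none
       let sf : Option String × Option String :=
         if ps.length > 2 then
           match PySem.Int.ofStr? (ps.getD 2 "") with
           | some _ =>
             match sstep1 with
             | none => (some (ps.getD 2 ""), none)
             | some s => (some s, some (ps.getD 2 ""))
           | none => (none, none)
         else (sstep1, none)
       let stStep : Option String × Option Int :=
         match sf.1 with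
         | none => (st.1, st.2.2.1)
         | some s =>
           let istep := (PySem.Int.ofStr? s).getD 0
           match st.2.2.1 with
           | none => (some s, some istep)
           | some li => if istep > li then (some s, some istep) else (st.1, some li)
       let stFrm : Option (PySem.Dict String String) × Option (PySem.Dict Int Int) :=
         match sf.2 with
         | none => (st.2.1, st.2.2.2)
         | some f =>
           let s := (sf.1).getD ""
           let istep := (PySem.Int.ofStr? s).getD 0
           let iframe := (PySem.Int.ofStr? f).getD 0
           match st.2.1, st.2.2.2 with
           | none, _ => (some (PySem.Dict.insert PySem.Dict.empty s f),
                         some (PySem.Dict.insert PySem.Dict.empty istep iframe))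
           | some lf, none => (some lf, none)
           | some lf, some lfi =>
             if !(lfi.contains istep) then (some (lf.insert s f), some (lfi.insert istep iframe))
             else if iframe > lfi.getD istep 0 then (some (lf.insert s f), some (lfi.insert istep iframe))
             else (some lf, some lfi)
       (stStep.1, stFrm.1, stStep.2, stFrm.2)) =
      match
        (if ps.length < 2 then none
         else if ps.length == 2 then
           if (pvAsInt? (ps.getD 1 "")).isSome then some (ps.getD 1 "", none) else none
         else if (pvAsInt? (ps.getD 2 "")).isNone then none
         else if (pvAsInt? (ps.getD 1 "")).isSome then some (ps.getD 1 "", some (ps.getD 2 ""))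
         else some (ps.getD 2 "", none) : Option (String × Option String)) with
      | none => st
      | some r => pvAgg st r := by
  obtain ⟨a, b, c, d⟩ := st
  match ps with
  | [] => rfl
  | [x] => rfl
  | [x, y] =>
    cases hy : PySem.Int.ofStr? y with
    | none => simp [hy, pvAsInt?]
    | some v => simp [hy, pvAsInt?, pvAgg, pvStepU, pvFrmA]
  | x :: y :: z :: t =>
    cases hz : PySem.Int.ofStr? z with
    | none => simp [hz, pvAsInt?]
    | some w =>
      cases hy : PySem.Int.ofStr? y with
      | none => simp [hz, hy, pvAsInt?, pvAgg, pvStepU, pvFrmA]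
      | some v => simp [hz, hy, pvAsInt?, pvAgg, pvStepU, pvFrmA]

theorem pvStepA_factor (st : PvStA) (rp : List String) :
    pvStepA st rp =
      match pvParse ((PySem.List.pyGet? rp 1).getD "") with
      | none => st
      | some r => pvAgg st r :=
  factor_core st ((PySem.Str.split? ((PySem.List.pyGet? rp 1).getD "") ":").getD [])

theorem foldA_filterMap (l : List (List String)) (st : PvStA) :
    l.foldl pvStepA st =
      (l.filterMap (fun rp => pvParse ((PySem.List.pyGet? rp 1).getD ""))).foldl pvAgg st := by
  induction l generalizing st with
  | nil => rfl
  | cons rp t ih =>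
    simp only [List.foldl_cons, List.filterMap_cons, pvStepA_factor]
    cases pvParse ((PySem.List.pyGet? rp 1).getD "") with
    | none => exact ih st
    | some r => simp [List.foldl_cons, ih]

theorem foldAgg_split (recs : List (String × Option String))
    (a : Option String) (b : Option (PySem.Dict String String)) (c : Option Int)
    (d : Option (PySem.Dict Int Int)) :
    recs.foldl pvAgg (a, b, c, d) =
      ((recs.foldl pvStepU (a, c)).1, (recs.foldl pvFrmA (b, d)).1,
       (recs.foldl pvStepU (a, c)).2, (recs.foldl pvFrmA (b, d)).2) := by
  induction recs generalizing a b c d with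
  | nil => rfl
  | cons r t ih =>
    simp only [List.foldl_cons]
    rw [show pvAgg (a, b, c, d) r =
      ((pvStepU (a, c) r).1, (pvFrmA (b, d) r).1, (pvStepU (a, c) r).2, (pvFrmA (b, d) r).2) from rfl]
    exact ih _ _ _ _

def pvStProj (m : Option (String × Option String)) : Option String × Option Int :=
  match m with
  | none => (none, none)
  | some r => (some r.1, some ((pvAsInt? r.1).getD 0))

-- A's (last_step, last_step_int) fold is the first-maximal fold behind PySem.List.max?
theorem foldU_eq_max (recs : List (String × Option String))
    (acc : Option (String × Option String)) :
    recs.foldl pvStepU (pvStProj acc) =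
      pvStProj (recs.foldl
        (fun a x => match a with
          | none => some x
          | some m => if ((pvAsInt? m.1).getD 0) < ((pvAsInt? x.1).getD 0) then some x else some m)
        acc) := by
  induction recs generalizing acc with
  | nil => rfl
  | cons r t ih =>
    simp only [List.foldl_cons]
    have h : pvStepU (pvStProj acc) r =
        pvStProj (match acc with
          | none => some r
          | some m => if ((pvAsInt? m.1).getD 0) < ((pvAsInt? r.1).getD 0) then some r else some m) := by
      cases acc with
      | none => rfl
      | some m =>
        simp only [pvStProj, pvStepU]
        by_cases hlt : ((pvAsInt? m.1).getD 0) < ((pvAsInt? r.1).getD 0)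
        · simp [hlt, gt_iff_lt]
        · simp [hlt, gt_iff_lt]
    rw [h]; exact ih _

theorem insert_items_ne_nil {κ ν : Type} [BEq κ] (d : PySem.Dict κ ν) (k : κ) (v : ν) :
    (PySem.Dict.insert d k v).items ≠ [] := by
  by_cases h : d.contains k
  · simp only [PySem.Dict.insert, h, if_pos]
    intro hc
    simp only [List.map_eq_nil_iff] at hc
    simp [PySem.Dict.contains, hc] at h
  · simp [PySem.Dict.insert, h]

def pvFProj (d : PySem.Dict String String × PySem.Dict Int Int) :
    Option (PySem.Dict String String) × Option (PySem.Dict Int Int) :=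
  (if d.1.items.isEmpty then none else some d.1, if d.2.items.isEmpty then none else some d.2)

-- one frame step: A's option-dict update corresponds to B's dict update under pvFProj
theorem frm_step (d : PySem.Dict String String × PySem.Dict Int Int)
    (r : String × Option String) (h : d.1.items = [] ↔ d.2.items = []) :
    pvFrmA (pvFProj d) r = pvFProj (pvFrameStep d r) ∧
      ((pvFrameStep d r).1.items = [] ↔ (pvFrameStep d r).2.items = []) := by
  obtain ⟨d1, d2⟩ := d
  cases hr : r.2 with
  | none =>
    constructor
    · simp [pvFrmA, pvFrameStep, hr]
    · simpa [pvFrameStep, hr] using h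
  | some f =>
    by_cases he : d1.items = []
    · have he2 : d2.items = [] := h.mp he
      have e1 : d1 = PySem.Dict.empty := by
        apply PySem.Dict.ext; simp [he, PySem.Dict.empty]
      have e2 : d2 = PySem.Dict.empty := by
        apply PySem.Dict.ext; simp [he2, PySem.Dict.empty]
      subst e1; subst e2
      constructor
      · simp [pvFrmA, pvFrameStep, hr, pvFProj, PySem.Dict.contains, PySem.Dict.empty,
          insert_items_ne_nil]
      · simp [pvFrameStep, hr, PySem.Dict.contains, PySem.Dict.empty, insert_items_ne_nil]
    · have hne2 : ¬ d2.items = [] := fun hc => he (h.mpr hc)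
      have hproj : pvFProj (d1, d2) = (some d1, some d2) := by
        simp [pvFProj, List.isEmpty_iff, he, hne2]
      rw [hproj]
      by_cases hc : d2.contains ((pvAsInt? r.1).getD 0)
      · by_cases hg : (pvAsInt? f).getD 0 > d2.getD ((pvAsInt? r.1).getD 0) 0
        · constructor
          · simp [pvFrmA, pvFrameStep, hr, hc, hg, pvFProj, insert_items_ne_nil]
          · simp [pvFrameStep, hr, hc, hg, insert_items_ne_nil]
        · constructor
          · simp [pvFrmA, pvFrameStep, hr, hc, hg, pvFProj, List.isEmpty_iff, he, hne2]
          · simp [pvFrameStep, hr, hc, hg, he, hne2]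
      · constructor
        · simp [pvFrmA, pvFrameStep, hr, hc, pvFProj, insert_items_ne_nil]
        · simp [pvFrameStep, hr, hc, insert_items_ne_nil]

theorem foldFrm_eq (recs : List (String × Option String))
    (d : PySem.Dict String String × PySem.Dict Int Int)
    (h : d.1.items = [] ↔ d.2.items = []) :
    recs.foldl pvFrmA (pvFProj d) = pvFProj (recs.foldl pvFrameStep d) := by
  induction recs generalizing d with
  | nil => rfl
  | cons r t ih =>
    simp only [List.foldl_cons]
    obtain ⟨h1, h2⟩ := frm_step d r h
    rw [h1]; exact ih _ h2

-- ===== VERDICT (by name: the statement is the Claim_ definition above) =====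
theorem compute_last_step_frames_spec : Claim_equal_compute_last_step_frames := by
  intro res_list _ _
  unfold Spec_compute_last_step_frames
  show compute_last_step_frames res_list = compute_last_step_frames_alt res_list
  unfold compute_last_step_frames compute_last_step_frames_alt
  rw [foldA_filterMap]
  set recs := res_list.filterMap (fun rp => pvParse ((PySem.List.pyGet? rp 1).getD "")) with hrecs
  rw [foldAgg_split]
  have hmax : PySem.List.max? recs (fun r => (pvAsInt? r.1).getD 0) =
      recs.foldl
        (fun a x => match a with
          | none => some x
          | some m => if ((pvAsInt? m.1).getD 0) < ((pvAsInt? x.1).getD 0) then some x else some m)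
        none := by
    unfold PySem.List.max?
    congr 1
    funext a x
    cases a <;> rfl
  have hstep : recs.foldl pvStepU ((none : Option String), (none : Option Int)) =
      pvStProj (PySem.List.max? recs (fun r => (pvAsInt? r.1).getD 0)) := by
    rw [hmax]
    exact foldU_eq_max recs none
  have hfrm : recs.foldl pvFrmA ((none : Option (PySem.Dict String String)),
        (none : Option (PySem.Dict Int Int))) =
      pvFProj (recs.foldl pvFrameStep (PySem.Dict.empty, PySem.Dict.empty)) := by
    exact foldFrm_eq recs (PySem.Dict.empty, PySem.Dict.empty) (by simp [PySem.Dict.empty])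
  rw [hstep, hfrm]
  cases hm : PySem.List.max? recs (fun r => (pvAsInt? r.1).getD 0) with
  | none =>
    have hnil : recs = [] := (PySem.List.max?_eq_none_iff _ _).mp hm
    rw [hnil]
    simp [pvStProj, pvFProj, PySem.Dict.empty, PySem.List.max?]
  | some m =>
    simp only [pvStProj]
    by_cases hie : ((recs.foldl pvFrameStep (PySem.Dict.empty, PySem.Dict.empty)).1).items.isEmpty
    · simp [pvFProj, hie]
      rw [hm]
    · simp [pvFProj, hie]
      rw [hm]
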